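-- pv_equiv track=rewrite | github.com/g-assismoraes/beecrowd | AD-HOC/1218.py | consulta
-- ===== SOURCE A (Python) =====
-- def consulta(consultar, dados, qtd):
--     t, f, m = 0, 0, 0
--     for i in range(qtd):
--         if dados[i][0] == consultar:
--             t += 1
--             if dados[i][1] == 'F':
--                 f += 1
--             else:
--                 m += 1
--     return t, f, m
-- ===== SOURCE B (Python) =====
-- def consulta(consultar, dados, qtd):
--     matches = []
--     for i in range(qtd):
--         if dados[i][0] == consultar:
--             matches.append(dados[i][1])
--     t = len(matches)
--     f = matches.count('F')
--     return t, f, t - f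
-- ===== Notes on version B (the rewrite author's own statement) =====
-- stated objective: simpler
-- what changed: B replaces the three inline counters with a collect-then-count decomposition: one pass gathers the genders of matching records into a list, then t = len, f = count('F') and m = t - f are derived from that list.
import Mathlib
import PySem

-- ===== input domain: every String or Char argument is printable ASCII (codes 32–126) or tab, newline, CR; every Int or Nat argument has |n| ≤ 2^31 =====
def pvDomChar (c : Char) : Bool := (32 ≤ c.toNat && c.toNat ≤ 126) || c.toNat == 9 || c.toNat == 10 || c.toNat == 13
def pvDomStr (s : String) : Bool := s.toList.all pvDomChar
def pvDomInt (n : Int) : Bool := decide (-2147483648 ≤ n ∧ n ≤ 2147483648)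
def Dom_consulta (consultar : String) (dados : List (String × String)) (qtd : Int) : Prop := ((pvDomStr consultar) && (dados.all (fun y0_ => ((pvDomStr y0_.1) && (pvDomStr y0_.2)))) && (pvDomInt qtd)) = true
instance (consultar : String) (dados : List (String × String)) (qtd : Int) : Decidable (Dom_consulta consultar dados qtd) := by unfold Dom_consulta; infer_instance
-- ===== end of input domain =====

-- B replaces A's three inline counters by collect-then-count: gather the matching genders into a
-- list, then derive t = len, f = count('F'), m = t - f.  Objective: simpler.

-- ===== PORT A =====
-- loop body of A: index dados[i]; pyGet? = none is Python's IndexError (excluded by Pre_,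
-- under which the 'none => st' branch is unreachable).
def pvStepA (consultar : String) (dados : List (String × String)) (st : Int × Int × Int) (i : Int) : Int × Int × Int :=
  match PySem.List.pyGet? dados i with
  | some r =>
    if r.1 == consultar then
      (if r.2 == "F" then (st.1 + 1, st.2.1 + 1, st.2.2)
       else (st.1 + 1, st.2.1, st.2.2 + 1))
    else st
  | none => st

def consulta (consultar : String) (dados : List (String × String)) (qtd : Int) : Int × Int × Int :=
  (PySem.List.pyRange 0 qtd 1).foldl (pvStepA consultar dados) (0, 0, 0)

-- ===== PORT B =====
-- loop body of B: append dados[i][1] to `matches` when dados[i][0] == consultar.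
def pvStepB (consultar : String) (dados : List (String × String)) (acc : List String) (i : Int) : List String :=
  match PySem.List.pyGet? dados i with
  | some r => if r.1 == consultar then acc ++ [r.2] else acc
  | none => acc

def consulta_alt (consultar : String) (dados : List (String × String)) (qtd : Int) : Int × Int × Int :=
  let ms := (PySem.List.pyRange 0 qtd 1).foldl (pvStepB consultar dados) []
  ((ms.length : Int), (ms.count "F" : Int), (ms.length : Int) - (ms.count "F" : Int))

-- ===== PRECONDITION & SPEC =====
-- Pre_ excludes qtd > len(dados), on which both Pythons raise IndexError at dados[i].
def Pre_consulta (consultar : String) (dados : List (String × String)) (qtd : Int) : Prop :=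
  qtd ≤ (dados.length : Int)
instance (consultar : String) (dados : List (String × String)) (qtd : Int) : Decidable (Pre_consulta consultar dados qtd) := by unfold Pre_consulta; infer_instance

def pvWitness_consulta : String × (List (String × String)) × Int := ("ana", [("ana", "F"), ("bob", "M")], 2)

def Spec_consulta (consultar : String) (dados : List (String × String)) (qtd : Int) (out : Int × Int × Int) : Prop := out = consulta_alt consultar dados qtd
instance (consultar : String) (dados : List (String × String)) (qtd : Int) (out : Int × Int × Int) : Decidable (Spec_consulta consultar dados qtd out) := by unfold Spec_consulta; infer_instance

-- ===== CLAIM (what is proved, stated in full; the proofs are below) =====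
def Claim_equal_consulta : Prop := ∀ (consultar : String) (dados : List (String × String)) (qtd : Int), Dom_consulta consultar dados qtd → Pre_consulta consultar dados qtd → Spec_consulta consultar dados qtd (consulta consultar dados qtd)

-- ===== LEMMAS AND PROOFS =====

lemma pvStepB_acc (consultar : String) (dados : List (String × String)) (acc : List String) (i : Int) :
    pvStepB consultar dados acc i = acc ++ pvStepB consultar dados [] i := by
  unfold pvStepB
  cases PySem.List.pyGet? dados i with
  | none => simp
  | some r => by_cases h : r.1 == consultar <;> simp [h]

lemma pvCollect_acc (consultar : String) (dados : List (String × String)) :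
    ∀ (is_ : List Int) (acc : List String),
      is_.foldl (pvStepB consultar dados) acc = acc ++ is_.foldl (pvStepB consultar dados) [] := by
  intro is_
  induction is_ with
  | nil => intro acc; simp
  | cons i is_ ih =>
    intro acc
    simp only [List.foldl_cons]
    rw [ih (pvStepB consultar dados acc i), ih (pvStepB consultar dados [] i), pvStepB_acc]
    simp

lemma pvMain (consultar : String) (dados : List (String × String)) :
    ∀ (is_ : List Int) (st : Int × Int × Int),
      is_.foldl (pvStepA consultar dados) st =
      (st.1 + ((is_.foldl (pvStepB consultar dados) []).length : Int),
       st.2.1 + ((is_.foldl (pvStepB consultar dados) []).count "F" : Int),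
       st.2.2 + (((is_.foldl (pvStepB consultar dados) []).length : Int)
            - ((is_.foldl (pvStepB consultar dados) []).count "F" : Int))) := by
  intro is_
  induction is_ with
  | nil => intro st; simp
  | cons i is_ ih =>
    intro st
    simp only [List.foldl_cons]
    rw [ih (pvStepA consultar dados st i),
        pvCollect_acc consultar dados is_ (pvStepB consultar dados [] i)]
    unfold pvStepA pvStepB
    cases PySem.List.pyGet? dados i with
    | none => simp
    | some r =>
      by_cases h : r.1 == consultar
      · by_cases hf : r.2 == "F"
        · have he : r.2 = "F" := beq_iff_eq.mp hf
          simp [h, he, Prod.ext_iff]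
          omega
        · have he : ¬ r.2 = "F" := fun e => hf (beq_iff_eq.mpr e)
          simp [h, he, Prod.ext_iff]
          omega
      · simp [h]

-- ===== VERDICT (by name: the statement is the Claim_ definition above) =====
theorem consulta_spec : Claim_equal_consulta := by
  intro consultar dados qtd _ _
  unfold Spec_consulta consulta consulta_alt
  rw [pvMain consultar dados (PySem.List.pyRange 0 qtd 1) (0, 0, 0)]
  simp
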